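-- pv_equiv track=rewrite | github.com/AxelSchneewind/cpa | test_progs/nested_cegar_unsafe.py | accumulate_unsafe
-- ===== SOURCE A (Python) =====
-- def inc(x):
--     return x + 1
--
-- def buggy_double_inc(x):
--     return x + 3  # Bug: +3 instead of +2
--
-- def accumulate_unsafe(n):
--     i = 0
--     total = 0
--     while i < n:
--         j = 0
--         inner = 0
--         while j < 3:
--             inner += buggy_double_inc(j)
--             j = inc(j)
--         total += inner
--         i = inc(i)
--     return total
-- ===== SOURCE B (Python) =====
-- def accumulate_unsafe(n):
--     # closed form: inner loop always contributes (0+3)+(1+3)+(2+3) = 12 per iteration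
--     return 12 * max(n, 0)
-- ===== Notes on version B (the rewrite author's own statement) =====
-- stated objective: faster
-- what changed: Replaced the nested while loops by the closed form 12*max(n,0), since each outer iteration adds the constant inner sum 3+4+5=12.
import Mathlib
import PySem

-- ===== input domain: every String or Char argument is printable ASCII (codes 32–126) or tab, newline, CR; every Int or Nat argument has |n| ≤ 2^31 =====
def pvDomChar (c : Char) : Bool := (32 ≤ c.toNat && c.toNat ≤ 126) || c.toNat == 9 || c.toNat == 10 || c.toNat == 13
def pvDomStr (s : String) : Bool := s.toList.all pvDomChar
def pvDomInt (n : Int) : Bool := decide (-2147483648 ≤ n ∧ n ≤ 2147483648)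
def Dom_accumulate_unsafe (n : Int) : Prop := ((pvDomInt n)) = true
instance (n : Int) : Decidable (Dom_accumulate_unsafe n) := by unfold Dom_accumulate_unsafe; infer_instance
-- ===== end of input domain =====

-- B replaces A's nested while loops by the closed form 12*max(n,0) (the inner loop always adds 3+4+5=12); asymptotically faster.

-- ===== PORT A =====
def pvInc (x : Int) : Int := x + 1

def pvBuggyDoubleInc (x : Int) : Int := x + 3

-- inner `while j < 3` loop of A
def pvInnerLoop (j inner : Int) : Int :=
  if _h : j < 3 then pvInnerLoop (pvInc j) (inner + pvBuggyDoubleInc j) else inner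
termination_by (3 - j).toNat
decreasing_by simp [pvInc]; omega

-- outer `while i < n` loop of A
def pvOuterLoop (n i total : Int) : Int :=
  if _h : i < n then pvOuterLoop n (pvInc i) (total + pvInnerLoop 0 0) else total
termination_by (n - i).toNat
decreasing_by simp [pvInc]; omega

def accumulate_unsafe (n : Int) : Int := pvOuterLoop n 0 0

-- ===== PORT B =====
def accumulate_unsafe_alt (n : Int) : Int := 12 * max n 0

-- ===== PRECONDITION & SPEC =====
def Spec_accumulate_unsafe (n : Int) (out : Int) : Prop := out = accumulate_unsafe_alt n
instance (n : Int) (out : Int) : Decidable (Spec_accumulate_unsafe n out) := by unfold Spec_accumulate_unsafe; infer_instance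

-- ===== CLAIM (what is proved, stated in full; the proofs are below) =====
def Claim_equal_accumulate_unsafe : Prop := ∀ (n : Int), Dom_accumulate_unsafe n → Spec_accumulate_unsafe n (accumulate_unsafe n)

-- ===== LEMMAS AND PROOFS =====
theorem pvInnerLoop_zero : pvInnerLoop 0 0 = 12 := by
  rw [pvInnerLoop]; rw [pvInnerLoop]; rw [pvInnerLoop]; rw [pvInnerLoop]
  norm_num [pvInc, pvBuggyDoubleInc]

theorem pvOuterLoop_eq (n i total : Int) :
    pvOuterLoop n i total = total + 12 * max (n - i) 0 := by
  rw [pvOuterLoop]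
  split_ifs with h
  · rw [pvOuterLoop_eq n (pvInc i) (total + pvInnerLoop 0 0), pvInnerLoop_zero]
    simp [pvInc]
    omega
  · omega
termination_by (n - i).toNat
decreasing_by simp [pvInc]; omega

-- ===== VERDICT (by name: the statement is the Claim_ definition above) =====
theorem accumulate_unsafe_spec : Claim_equal_accumulate_unsafe := by
  intro n _
  unfold Spec_accumulate_unsafe accumulate_unsafe accumulate_unsafe_alt
  rw [pvOuterLoop_eq]
  omega
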